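-- pv_equiv track=rewrite | github.com/VladKha/CodeWars | 6 kyu/Throwing Darts/solve.py | score_throws
-- ===== SOURCE A (Python) =====
-- def score_throws(radii):
--     result = 0
--     all_less_5 = True
--     for r in radii:
--         if r > 10:
--             all_less_5 = False
--         elif r < 5:
--             result += 10
--         else:
--             result += 5
--             all_less_5 = False
--     if radii and all_less_5:
--         result += 100
--     return result
-- ===== SOURCE B (Python) =====
-- def score_throws(radii):
--     n = len(radii)
--     bulls = sum(1 for r in radii if r < 5)
--     misses = sum(1 for r in radii if r > 10)
--     bonus = 100 if 0 < n == bulls else 0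
--     return 10 * bulls + 5 * (n - bulls - misses) + bonus
-- ===== Notes on version B (the rewrite author's own statement) =====
-- stated objective: alternative
-- what changed: Replaced A's fused loop threading a score accumulator and an all_less_5 flag with classification counting: count bullseyes and misses, then compute the score by the closed formula 10*bulls + 5*(n-bulls-misses) plus a bonus decided by the count comparison bulls == n.
import Mathlib
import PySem

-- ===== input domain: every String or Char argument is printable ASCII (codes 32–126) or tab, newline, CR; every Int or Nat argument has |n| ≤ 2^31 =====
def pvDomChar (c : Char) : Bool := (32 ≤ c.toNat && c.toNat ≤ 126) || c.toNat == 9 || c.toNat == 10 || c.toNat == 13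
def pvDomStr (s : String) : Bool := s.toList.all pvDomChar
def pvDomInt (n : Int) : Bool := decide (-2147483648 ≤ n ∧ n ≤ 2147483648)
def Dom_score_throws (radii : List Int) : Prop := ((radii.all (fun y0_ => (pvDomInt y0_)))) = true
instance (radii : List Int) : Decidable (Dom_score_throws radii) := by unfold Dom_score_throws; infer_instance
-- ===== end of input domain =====

-- B replaces A's fused accumulator+flag loop with classification counts and a closed scoring formula; same O(n) cost.

-- ===== PORT A =====
-- A's fused loop threading (result, all_less_5) through the list.
def score_throws (radii : List Int) : Int :=
  let st := radii.foldl (fun (st : Int × Bool) r =>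
    if r > 10 then (st.1, false)
    else if r < 5 then (st.1 + 10, st.2)
    else (st.1 + 5, false)) (0, true)
  if radii ≠ [] ∧ st.2 then st.1 + 100 else st.1

-- ===== PORT B =====
-- B: count bullseyes and misses, then a closed arithmetic formula; bonus decided by bulls == n.
def score_throws_alt (radii : List Int) : Int :=
  let n : Int := radii.length
  let bulls : Int := (radii.countP (fun r => decide (r < 5)) : Nat)
  let misses : Int := (radii.countP (fun r => decide (r > 10)) : Nat)
  let bonus : Int := if 0 < n ∧ n = bulls then 100 else 0
  10 * bulls + 5 * (n - bulls - misses) + bonus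

-- ===== PRECONDITION & SPEC =====
def Spec_score_throws (radii : List Int) (out : Int) : Prop := out = score_throws_alt radii
instance (radii : List Int) (out : Int) : Decidable (Spec_score_throws radii out) := by unfold Spec_score_throws; infer_instance

-- ===== CLAIM (what is proved, stated in full; the proofs are below) =====
def Claim_equal_score_throws : Prop := ∀ (radii : List Int), Dom_score_throws radii → Spec_score_throws radii (score_throws radii)

-- ===== LEMMAS AND PROOFS =====

-- A's fold state in terms of the classification counts and the all-bullseye predicate.
theorem score_throws_fold_char (radii : List Int) (acc : Int) (b : Bool) :
    radii.foldl (fun (st : Int × Bool) r =>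
      if r > 10 then (st.1, false)
      else if r < 5 then (st.1 + 10, st.2)
      else (st.1 + 5, false)) (acc, b)
    = (acc + 10 * (radii.countP (fun r => decide (r < 5)) : Int)
           + 5 * ((radii.length : Int) - (radii.countP (fun r => decide (r < 5)) : Int)
                  - (radii.countP (fun r => decide (r > 10)) : Int)),
       b && radii.all (fun r => decide (r < 5))) := by
  induction radii generalizing acc b with
  | nil => simp
  | cons r rs ih =>
    simp only [List.foldl_cons, List.countP_cons, List.length_cons, List.all_cons]
    by_cases h1 : r > 10
    · have h2 : ¬ r < 5 := by omega
      simp [h1, h2, ih]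
      ring
    · by_cases h2 : r < 5
      · simp [h1, h2, ih]
        ring
      · simp [h1, h2, ih]
        ring

-- All elements < 5 iff the bullseye count equals the length.
theorem all_lt_iff_countP_eq (radii : List Int) :
    (radii.all (fun r => decide (r < 5)) = true) ↔
      radii.countP (fun r => decide (r < 5)) = radii.length := by
  rw [List.all_eq_true, List.countP_eq_length]

-- ===== VERDICT (by name: the statement is the Claim_ definition above) =====
theorem score_throws_spec : Claim_equal_score_throws := by
  intro radii _
  unfold Spec_score_throws score_throws score_throws_alt
  simp only [score_throws_fold_char, Bool.true_and]
  by_cases hall : radii.all (fun r => decide (r < 5)) = true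
  · have hc := (all_lt_iff_countP_eq radii).mp hall
    by_cases hne : radii = []
    · subst hne; simp
    · have hn : 0 < (radii.length : Int) := by
        have : 0 < radii.length := List.length_pos_of_ne_nil hne
        exact_mod_cast this
      simp [hall, hne, hc]
  · have hc : ¬ radii.countP (fun r => decide (r < 5)) = radii.length := by
      intro h; exact hall ((all_lt_iff_countP_eq radii).mpr h)
    have hc' : ¬ ((radii.length : Int) = (radii.countP (fun r => decide (r < 5)) : Int)) := by
      intro h; exact hc (by exact_mod_cast h.symm)
    simp [hall, hc']
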